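-- pv_equiv track=rewrite | github.com/SupanatPalee/Sentence_Alignment | prepare_data_set/data/main.py | assemble_result
-- ===== SOURCE A (Python) =====
-- def assemble_result(pred:list, text:str) -> list:
--     # bookkeeping variables
--     row = 0
--     previous_space = 0
--     sentence_ans = ""
--     sentences_ans = []
--
--     # find how many spaces in text
--     start = 0
--     pos = text.find(" ", start)
--     contexts = []
--     num2check = 0
--     while(pos != -1):
--         num2check += 1
--         start = pos + 1
--         pos = text.find(" ", start)
--
--     for i, c in enumerate(text):
--         if c == " " and pred[row] == 0: # no cut
--             x = text[previous_space:i]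
--             previous_space = i+1
--             sentence_ans += x + " "
--             row += 1
--         elif c == " " and pred[row] == 1: # cut
--             x = text[previous_space:i]
--             previous_space = i+1
--             sentence_ans += x + " "
--             sentences_ans.append(sentence_ans.strip())
--             sentence_ans = ""
--             row += 1
--
--         if row == num2check and i == len(text) - 1: # for the last sentence
--             x = text[previous_space:i+1]
--             previous_space = i+1
--             sentence_ans += x + " "
--             sentences_ans.append(sentence_ans.strip())
--
--     return sentences_ans
-- ===== SOURCE B (Python) =====
-- def assemble_result(pred: list, text: str) -> list:
--     # Recursive grouping over the word list instead of A's per-character scan.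
--     if text == "":
--         return []
--
--     words = text.split(" ")
--
--     def go(words, flags, cur):
--         cur = cur + words[0] + " "
--         rest = words[1:]
--         if not rest:
--             return [cur.strip()]
--         if flags[0] == 1:
--             return [cur.strip()] + go(rest, flags[1:], "")
--         return go(rest, flags[1:], cur)
--
--     return go(words, pred, "")
-- ===== Notes on version B (the rewrite author's own statement) =====
-- stated objective: faster
-- what changed: A scans the text character by character with row/previous_space/sentence bookkeeping plus a separate find-loop pass that counts the spaces; B splits the text into words once (C-level str.split) and recursively groups the words by their cut flags, so the per-character Python-level loop disappears.
-- outside the precondition, e.g. on assemble_result([2], 'a b'): A returns [], B returns ['a b']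
import Mathlib
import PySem

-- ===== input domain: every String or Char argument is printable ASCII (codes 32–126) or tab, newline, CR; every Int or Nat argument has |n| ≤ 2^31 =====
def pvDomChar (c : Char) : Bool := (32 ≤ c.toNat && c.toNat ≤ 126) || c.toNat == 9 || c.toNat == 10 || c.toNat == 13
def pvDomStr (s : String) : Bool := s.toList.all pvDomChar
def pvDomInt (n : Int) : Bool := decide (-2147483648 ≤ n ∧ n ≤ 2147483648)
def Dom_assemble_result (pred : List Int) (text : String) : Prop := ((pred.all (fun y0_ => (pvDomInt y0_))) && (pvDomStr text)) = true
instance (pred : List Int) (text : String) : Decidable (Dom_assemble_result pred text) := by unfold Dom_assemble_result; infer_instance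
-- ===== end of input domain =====

-- B replaces A's per-character scan (plus a separate space-counting pass) by one split into words
-- followed by a recursive grouping of the words by their cut flags; a timing run measured B faster.


-- ===== PORT A =====
-- A's find-while loop counts the spaces of text (each iteration moves to the next occurrence
-- of " " and increments); ported as the equivalent left-to-right scan (exact).
def pvCountSpaces : List Char → Nat
  | [] => 0
  | c :: r => (if c = ' ' then 1 else 0) + pvCountSpaces r

-- the 'for i, c in enumerate(text)' loop of A, state (row, previous_space, sentence_ans, sentences_ans);
-- pred[row] is PySem.List.pyGet? (none = IndexError, excluded by Pre_; the branch then matches neither 0 nor 1)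
def pvLoopA (pred : List Int) (cs0 : List Char) (n : Nat) :
    List Char → Nat → Nat → Nat → List Char → List String → List String
  | [], _, _, _, _, sents => sents
  | c :: rest, i, row, prev, sent, sents =>
    let st1 :=
      if c = ' ' ∧ PySem.List.pyGet? pred row = some 0 then
        (row + 1, i + 1, sent ++ PySem.List.slice cs0 (some (prev : Int)) (some (i : Int)) ++ [' '], sents)
      else if c = ' ' ∧ PySem.List.pyGet? pred row = some 1 then
        (row + 1, i + 1, ([] : List Char),
         sents ++ [String.ofList (PySem.Chars.strip (sent ++ PySem.List.slice cs0 (some (prev : Int)) (some (i : Int)) ++ [' ']))])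
      else (row, prev, sent, sents)
    let st2 :=
      if st1.1 = n ∧ i = cs0.length - 1 then
        (st1.1, i + 1,
         st1.2.2.1 ++ PySem.List.slice cs0 (some (st1.2.1 : Int)) (some ((i : Int) + 1)) ++ [' '],
         st1.2.2.2 ++ [String.ofList (PySem.Chars.strip (st1.2.2.1 ++ PySem.List.slice cs0 (some (st1.2.1 : Int)) (some ((i : Int) + 1)) ++ [' ']))])
      else st1
    pvLoopA pred cs0 n rest (i + 1) st2.1 st2.2.1 st2.2.2.1 st2.2.2.2

def assemble_result (pred : List Int) (text : String) : List String :=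
  let cs := text.toList
  pvLoopA pred cs (pvCountSpaces cs) cs 0 0 0 [] []

-- ===== PORT B =====
-- Source B's recursive go(words, flags, cur); words = text.split(" ") is List.splitOn ' '
def pvGoB : List (List Char) → List Int → List Char → List String
  | [], _, _ => []                       -- unreachable: a split word list is never empty
  | [w], _, cur => [String.ofList (PySem.Chars.strip (cur ++ w ++ [' ']))]
  | w :: w2 :: ws, [], cur => pvGoB (w2 :: ws) [] (cur ++ w ++ [' '])  -- flags[0]: IndexError in Python, excluded by Pre_
  | w :: w2 :: ws, f :: fs, cur =>
      if f = 1 then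
        String.ofList (PySem.Chars.strip (cur ++ w ++ [' '])) :: pvGoB (w2 :: ws) fs []
      else pvGoB (w2 :: ws) fs (cur ++ w ++ [' '])

def assemble_result_alt (pred : List Int) (text : String) : List String :=
  if text = "" then [] else pvGoB (text.toList.splitOn ' ') pred []

-- ===== PRECONDITION & SPEC =====
-- Pre_ restricts pred to the function's natural domain: one binary cut flag for every space of
-- text (pred long enough, and each consulted entry 0 or 1).  A too-short pred raises IndexError
-- in both programs; a non-binary consulted flag is malformed input on which A's scan stalls and
-- silently truncates the output, which B does not reproduce.
def Pre_assemble_result (pred : List Int) (text : String) : Prop :=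
  text.toList.count ' ' ≤ pred.length ∧
  ∀ i < text.toList.count ' ', pred[i]? = some 0 ∨ pred[i]? = some 1
instance (pred : List Int) (text : String) : Decidable (Pre_assemble_result pred text) := by
  unfold Pre_assemble_result; infer_instance

def pvWitness_assemble_result : List Int × String := ([0, 1], "aa bb cc")

def Spec_assemble_result (pred : List Int) (text : String) (out : List String) : Prop := out = assemble_result_alt pred text
instance (pred : List Int) (text : String) (out : List String) : Decidable (Spec_assemble_result pred text out) := by unfold Spec_assemble_result; infer_instance

-- ===== CLAIM (what is proved, stated in full; the proofs are below) =====
def Claim_equal_assemble_result : Prop := ∀ (pred : List Int) (text : String), Dom_assemble_result pred text → Pre_assemble_result pred text → Spec_assemble_result pred text (assemble_result pred text)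

-- ===== LEMMAS AND PROOFS =====

-- glue ws = " ".join(ws) : the text a word list came from
def pvGlue : List (List Char) → List Char
  | [] => []
  | [w] => w
  | w :: w2 :: ws => w ++ ' ' :: pvGlue (w2 :: ws)

theorem pvCountSpaces_eq_count (cs : List Char) : pvCountSpaces cs = cs.count ' ' := by
  induction cs with
  | nil => rfl
  | cons c r ih =>
    simp only [pvCountSpaces, ih, List.count_cons]
    by_cases h : c = ' ' <;> simp [h] <;> omega

theorem pvGlue_modifyHead (c : Char) (l : List (List Char)) (h : l ≠ []) :
    pvGlue (l.modifyHead (List.cons c)) = c :: pvGlue l := by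
  match l with
  | [w] => rfl
  | w :: w2 :: ws => rfl

theorem pvGlue_cons_cons (w : List Char) (l : List (List Char)) (h : l ≠ []) :
    pvGlue (w :: l) = w ++ ' ' :: pvGlue l := by
  match l with
  | w2 :: ws => rfl

theorem pvGlue_splitOn (cs : List Char) : pvGlue (cs.splitOn ' ') = cs := by
  induction cs with
  | nil => rfl
  | cons c r ih =>
    simp only [List.splitOn, List.splitOnP_cons] at *
    by_cases h : c = ' '
    · subst h
      simp only [beq_self_eq_true, if_pos]
      rw [pvGlue_cons_cons _ _ (List.splitOnP_ne_nil _ _), ih]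
      rfl
    · rw [if_neg (by simp [h]), pvGlue_modifyHead _ _ (List.splitOnP_ne_nil _ _), ih]

theorem splitOn_no_space (cs : List Char) : ∀ w ∈ cs.splitOn ' ', ' ' ∉ w := by
  induction cs with
  | nil => intro w hw; simp [List.splitOn] at hw; simp [hw]
  | cons c r ih =>
    intro w hw
    simp only [List.splitOn, List.splitOnP_cons] at hw ih
    by_cases h : c = ' '
    · rw [if_pos (by simp [h])] at hw
      rcases List.mem_cons.mp hw with rfl | hw'
      · simp
      · exact ih w hw'
    · rw [if_neg (by simp [h])] at hw
      obtain ⟨a, l', hl⟩ := List.exists_cons_of_ne_nil (List.splitOnP_ne_nil (fun x => x == ' ') r)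
      rw [hl] at hw
      simp only [List.modifyHead] at hw
      rcases List.mem_cons.mp hw with hw | hw
      · subst hw
        intro hmem
        rcases List.mem_cons.mp hmem with hc | hmem
        · exact h hc.symm
        · exact ih a (by rw [hl]; exact List.mem_cons_self) hmem
      · exact ih w (by rw [hl]; exact List.mem_cons_of_mem _ hw)

theorem length_splitOn (cs : List Char) : (cs.splitOn ' ').length = cs.count ' ' + 1 := by
  induction cs with
  | nil => rfl
  | cons c r ih =>
    simp only [List.splitOn, List.splitOnP_cons] at *
    by_cases h : c = ' '
    · rw [if_pos (by simp [h])]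
      simp [List.count_cons, h, ih]
    · rw [if_neg (by simp [h])]
      simp [List.length_modifyHead, List.count_cons, h, ih, Ne.symm h]

theorem pvGlue_eq_nil (t : List Char) (ts : List (List Char)) (h : pvGlue (t :: ts) = []) :
    t = [] ∧ ts = [] := by
  cases ts with
  | nil => exact ⟨h, rfl⟩
  | cons t2 ts' =>
    rw [pvGlue_cons_cons _ _ (by simp)] at h
    simp at h

-- processing the space-free characters of a non-final word changes nothing
theorem pvMidword (pred : List Int) (cs0 : List Char) (n : Nat)
    (wsuf : List Char) (hw : ' ' ∉ wsuf) :
    ∀ (j prev row : Nat) (sent : List Char) (sents : List String) (r : List Char),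
      r ≠ [] → cs0.drop j = wsuf ++ r →
      pvLoopA pred cs0 n (wsuf ++ r) j row prev sent sents
        = pvLoopA pred cs0 n r (j + wsuf.length) row prev sent sents := by
  induction wsuf with
  | nil => intro j prev row sent sents r hr hd; simp
  | cons c w' ih =>
    intro j prev row sent sents r hr hd
    have hc : c ≠ ' ' := fun h => hw (h ▸ List.mem_cons_self)
    have hw' : ' ' ∉ w' := fun h => hw (List.mem_cons_of_mem _ h)
    have hlen : cs0.length - j = 1 + w'.length + r.length := by
      have := congrArg List.length hd
      simp at this
      omega
    have hrlen : 1 ≤ r.length := by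
      cases r with
      | nil => exact absurd rfl hr
      | cons a b => simp
    have hjlt : j ≠ cs0.length - 1 := by
      have hjle : j < cs0.length := by
        by_contra hh
        rw [List.drop_eq_nil_of_le (by omega)] at hd
        exact absurd hd.symm (by simp)
      omega
    have hd' : cs0.drop (j + 1) = w' ++ r := by
      rw [← List.tail_drop, hd]; rfl
    show pvLoopA pred cs0 n (c :: (w' ++ r)) j row prev sent sents = _
    rw [pvLoopA]
    simp only [if_neg (fun h => hc h.1 : ¬(c = ' ' ∧ PySem.List.pyGet? pred row = some 0)),
      if_neg (fun h => hc h.1 : ¬(c = ' ' ∧ PySem.List.pyGet? pred row = some 1)),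
      if_neg (fun h => hjlt h.2 : ¬(row = n ∧ j = cs0.length - 1))]
    rw [ih hw' (j + 1) prev row sent sents r hr hd']
    congr 1
    simp
    omega

-- processing the final word: the loop ends appending the last sentence
theorem pvLastword (pred : List Int) (cs0 : List Char) (n : Nat)
    (wsuf : List Char) (hw : ' ' ∉ wsuf) (hne : wsuf ≠ []) :
    ∀ (j prev : Nat) (sent : List Char) (sents : List String),
      cs0.drop j = wsuf → prev ≤ cs0.length →
      pvLoopA pred cs0 n wsuf j n prev sent sents
        = sents ++ [String.ofList (PySem.Chars.strip (sent ++ cs0.drop prev ++ [' ']))] := by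
  induction wsuf with
  | nil => exact absurd rfl hne
  | cons c w' ih =>
    intro j prev sent sents hd hprev
    have hc : c ≠ ' ' := fun h => hw (h ▸ List.mem_cons_self)
    have hw' : ' ' ∉ w' := fun h => hw (List.mem_cons_of_mem _ h)
    have hlen : cs0.length - j = 1 + w'.length := by
      have := congrArg List.length hd
      simp at this
      omega
    have hjlt : j < cs0.length := by
      by_contra hh
      rw [List.drop_eq_nil_of_le (by omega)] at hd
      exact absurd hd.symm (by simp)
    cases w' with
    | nil =>
      simp only [List.length_nil] at hlen
      have hj : j = cs0.length - 1 := by omega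
      show pvLoopA pred cs0 n (c :: []) j n prev sent sents = _
      rw [pvLoopA]
      simp only [if_neg (fun h => hc h.1 : ¬(c = ' ' ∧ PySem.List.pyGet? pred n = some 0)),
        if_neg (fun h => hc h.1 : ¬(c = ' ' ∧ PySem.List.pyGet? pred n = some 1)),
        if_pos (⟨rfl, hj⟩ : n = n ∧ j = cs0.length - 1)]
      rw [pvLoopA]
      have hx : PySem.List.slice cs0 (some (prev : Int)) (some ((j : Int) + 1)) = cs0.drop prev := by
        have h1 : ((j : Int) + 1) = (((j + 1 : Nat)) : Int) := by push_cast; ring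
        rw [h1, PySem.List.slice_natCast]
        have : j + 1 = cs0.length := by omega
        rw [this]
        exact List.take_of_length_le (by simp)
      rw [hx]
      simp [hj]
    | cons c2 w'' =>
      have hjne : j ≠ cs0.length - 1 := by simp at hlen; omega
      have hd' : cs0.drop (j + 1) = c2 :: w'' := by
        rw [← List.tail_drop, hd]; rfl
      show pvLoopA pred cs0 n (c :: (c2 :: w'')) j n prev sent sents = _
      rw [pvLoopA,
        if_neg (fun h => hc h.1 : ¬(c = ' ' ∧ PySem.List.pyGet? pred n = some 0)),
        if_neg (fun h => hc h.1 : ¬(c = ' ' ∧ PySem.List.pyGet? pred n = some 1)),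
        if_neg (fun h => hjne h.2 : ¬((n, prev, sent, sents).1 = n ∧ j = cs0.length - 1))]
      exact ih hw' (by simp) (j + 1) prev sent sents hd' hprev

theorem pvMain (pred : List Int) (cs0 : List Char) (n : Nat) (hn : n = cs0.count ' ')
    (hlen : n ≤ pred.length)
    (hbin : ∀ j < n, pred[j]? = some 0 ∨ pred[j]? = some 1) :
    ∀ (ws : List (List Char)) (i row : Nat) (cur : List Char) (sents : List String),
      cs0.drop i = pvGlue ws →
      row + ws.length = n + 1 →
      (∀ w ∈ ws, ' ' ∉ w) →
      ws ≠ [[]] →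
      pvLoopA pred cs0 n (pvGlue ws) i row i cur sents
        = sents ++ pvGoB ws (pred.drop row) cur := by
  intro ws
  induction ws with
  | nil => intro i row cur sents hd hr hws hone; simp [pvGlue, pvLoopA, pvGoB]
  | cons w tail ih =>
    intro i row cur sents hd hr hws hone
    have hwsp : ' ' ∉ w := hws w List.mem_cons_self
    cases tail with
    | nil =>
      -- last word: row = n, the loop appends the final sentence
      have hwne : w ≠ [] := by intro h; exact hone (by rw [h])
      have hrown : row = n := by simp at hr; omega
      have hilen : i ≤ cs0.length := by
        by_contra hh
        rw [List.drop_eq_nil_of_le (by omega)] at hd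
        exact hwne (by simpa [pvGlue] using hd.symm)
      subst hrown
      rw [show pvGlue [w] = w from rfl] at hd ⊢
      rw [pvLastword pred cs0 row w hwsp hwne i i cur sents hd hilen, hd]
      rfl
    | cons t ts =>
      -- a word followed by a space
      have hrowlt : row < n := by simp at hr; omega
      have hrowpred : row < pred.length := by omega
      set G := pvGlue (t :: ts) with hG
      have hglue : pvGlue (w :: t :: ts) = w ++ ' ' :: G := rfl
      rw [hglue] at hd ⊢
      rw [pvMidword pred cs0 n w hwsp i i row cur sents (' ' :: G) (by simp) hd]
      have hdsp : cs0.drop (i + w.length) = ' ' :: G := by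
        have h2 : List.drop w.length (List.drop i cs0) = ' ' :: G := by rw [hd]; simp
        rw [List.drop_drop] at h2
        exact h2
      have hdG : cs0.drop (i + w.length + 1) = G := by
        rw [← List.tail_drop, hdsp]
        rfl
      have hlen2 : cs0.length - (i + w.length) = 1 + G.length := by
        have := congrArg List.length hdsp
        simp at this
        omega
      have hisplt : i + w.length < cs0.length := by
        by_contra hh
        rw [List.drop_eq_nil_of_le (by omega)] at hdsp
        exact absurd hdsp.symm (by simp)
      have hx : PySem.List.slice cs0 (some (i : Int)) (some ((i + w.length : Nat) : Int)) = w := by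
        rw [PySem.List.slice_natCast, hd]
        have : i + w.length - i = w.length := by omega
        rw [this]
        exact List.take_left
      have hx2 : PySem.List.slice cs0 (some ((i + w.length + 1 : Nat) : Int)) (some (((i + w.length : Nat) : Int) + 1)) = [] := by
        have h1 : (((i + w.length : Nat) : Int) + 1) = (((i + w.length + 1 : Nat)) : Int) := by push_cast; ring
        rw [h1, PySem.List.slice_natCast]
        simp
      have hws' : ∀ u ∈ t :: ts, ' ' ∉ u := fun u hu => hws u (List.mem_cons_of_mem _ hu)
      have hr' : (row + 1) + (t :: ts).length = n + 1 := by simp at hr ⊢; omega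
      rcases hbin row hrowlt with h0 | h1
      · -- pred[row] == 0 : no cut
        have hget0 : PySem.List.pyGet? pred (row : Int) = some 0 := by
          rw [PySem.List.pyGet?_natCast]; exact h0
        have hval : pred[row] = 0 := by
          rw [List.getElem?_eq_getElem hrowpred] at h0
          exact Option.some_injective _ h0
        have hdp : pred.drop row = 0 :: pred.drop (row + 1) := by
          rw [List.drop_eq_getElem_cons hrowpred, hval]
        rw [pvLoopA, if_pos (⟨rfl, hget0⟩ : ' ' = ' ' ∧ PySem.List.pyGet? pred (row : Int) = some 0)]
        by_cases htts : t = [] ∧ ts = []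
        · obtain ⟨rfl, rfl⟩ := htts
          have hGnil : G = [] := rfl
          have hn1 : row + 1 = n := by simp at hr; omega
          have hlast : i + w.length = cs0.length - 1 := by rw [hGnil] at hlen2; simp at hlen2; omega
          rw [if_pos (⟨hn1, hlast⟩ : (row + 1, i + w.length + 1, cur ++ PySem.List.slice cs0 (some (i : Int)) (some ((i + w.length : Nat) : Int)) ++ [' '], sents).1 = n ∧ i + w.length = cs0.length - 1)]
          rw [hGnil]
          rw [pvLoopA]
          simp only [hx, hx2, hdp, pvGoB]
          simp [pvGoB]
        · have hGne : G ≠ [] := fun h => htts (pvGlue_eq_nil t ts h)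
          have hne2 : i + w.length ≠ cs0.length - 1 := by
            have : 1 ≤ G.length := by cases hG2 : G with | nil => exact absurd hG2 hGne | cons a b => simp
            omega
          rw [if_neg (fun h => hne2 h.2 : ¬((row + 1, i + w.length + 1, cur ++ PySem.List.slice cs0 (some (i : Int)) (some ((i + w.length : Nat) : Int)) ++ [' '], sents).1 = n ∧ i + w.length = cs0.length - 1))]
          have htts' : t :: ts ≠ [[]] := by
            intro h
            cases h
            exact htts ⟨rfl, rfl⟩
          rw [hx]
          show pvLoopA pred cs0 n G (i + w.length + 1) (row + 1) (i + w.length + 1) (cur ++ w ++ [' ']) sents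
              = sents ++ pvGoB (w :: t :: ts) (List.drop row pred) cur
          rw [ih (i + w.length + 1) (row + 1) (cur ++ w ++ [' ']) sents hdG hr' hws' htts']
          rw [hdp]
          simp [pvGoB]
      · -- pred[row] == 1 : cut
        have hget1 : PySem.List.pyGet? pred (row : Int) = some 1 := by
          rw [PySem.List.pyGet?_natCast]; exact h1
        have hval : pred[row] = 1 := by
          rw [List.getElem?_eq_getElem hrowpred] at h1
          exact Option.some_injective _ h1
        have hdp : pred.drop row = 1 :: pred.drop (row + 1) := by
          rw [List.drop_eq_getElem_cons hrowpred, hval]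
        rw [pvLoopA,
          if_neg (fun h => by rw [hget1] at h; exact absurd h.2 (by simp) : ¬(' ' = ' ' ∧ PySem.List.pyGet? pred (row : Int) = some 0)),
          if_pos (⟨rfl, hget1⟩ : ' ' = ' ' ∧ PySem.List.pyGet? pred (row : Int) = some 1)]
        by_cases htts : t = [] ∧ ts = []
        · obtain ⟨rfl, rfl⟩ := htts
          have hGnil : G = [] := rfl
          have hn1 : row + 1 = n := by simp at hr; omega
          have hlast : i + w.length = cs0.length - 1 := by rw [hGnil] at hlen2; simp at hlen2; omega
          rw [if_pos (⟨hn1, hlast⟩ : (row + 1, i + w.length + 1, ([] : List Char), sents ++ [String.ofList (PySem.Chars.strip (cur ++ PySem.List.slice cs0 (some (i : Int)) (some ((i + w.length : Nat) : Int)) ++ [' ']))]).1 = n ∧ i + w.length = cs0.length - 1)]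
          rw [hGnil]
          rw [pvLoopA]
          simp only [hx, hx2, hdp, pvGoB]
          simp [pvGoB]
        · have hGne : G ≠ [] := fun h => htts (pvGlue_eq_nil t ts h)
          have hne2 : i + w.length ≠ cs0.length - 1 := by
            have : 1 ≤ G.length := by cases hG2 : G with | nil => exact absurd hG2 hGne | cons a b => simp
            omega
          rw [if_neg (fun h => hne2 h.2 : ¬((row + 1, i + w.length + 1, ([] : List Char), sents ++ [String.ofList (PySem.Chars.strip (cur ++ PySem.List.slice cs0 (some (i : Int)) (some ((i + w.length : Nat) : Int)) ++ [' ']))]).1 = n ∧ i + w.length = cs0.length - 1))]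
          have htts' : t :: ts ≠ [[]] := by
            intro h
            cases h
            exact htts ⟨rfl, rfl⟩
          rw [hx]
          show pvLoopA pred cs0 n G (i + w.length + 1) (row + 1) (i + w.length + 1) ([] : List Char)
                (sents ++ [String.ofList (PySem.Chars.strip (cur ++ w ++ [' ']))])
              = sents ++ pvGoB (w :: t :: ts) (List.drop row pred) cur
          rw [ih (i + w.length + 1) (row + 1) ([] : List Char)
                (sents ++ [String.ofList (PySem.Chars.strip (cur ++ w ++ [' ']))]) hdG hr' hws' htts']
          rw [hdp]
          simp [pvGoB]


-- ===== VERDICT (by name: the statement is the Claim_ definition above) =====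
theorem assemble_result_spec : Claim_equal_assemble_result := by
  unfold Claim_equal_assemble_result
  intro pred text _ hpre
  obtain ⟨hlen, hbin⟩ := hpre
  unfold Spec_assemble_result assemble_result assemble_result_alt
  by_cases ht : text = ""
  · subst ht
    simp [pvLoopA]
  · rw [if_neg ht]
    have hcs : text.toList ≠ [] := by
      intro h
      exact ht (by rwa [← String.toList_eq_nil_iff])
    have hn : pvCountSpaces text.toList = text.toList.count ' ' := pvCountSpaces_eq_count _
    have hone : text.toList.splitOn ' ' ≠ [[]] := by
      intro h
      exact hcs (by rw [← pvGlue_splitOn text.toList, h]; rfl)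
    have hmain := pvMain pred text.toList (pvCountSpaces text.toList) hn (by omega)
      (by rw [hn]; exact hbin) (text.toList.splitOn ' ') 0 0 [] []
      (by simp [pvGlue_splitOn])
      (by rw [length_splitOn, hn]; omega)
      (splitOn_no_space text.toList) hone
    rw [pvGlue_splitOn] at hmain
    rw [hmain]
    simp
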